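-- pv_equiv track=rewrite | github.com/azrishnr/doc_parser | parser.py | breakIngredient
-- ===== SOURCE A (Python) =====
-- def breakIngredient(ing):
--     units =  ['cup', 'can', 'bottle', 'tablespoon', 'tablespoons', 'tbsp', 'ounce', 'pound',
-- 'box', 'fliud ounce', 'fl oz', 'pint', 'gill','teaspoon', 'quart',
-- 'gallon', ' ml ', ' c. ', ' l ', ' ml ', ' dl ', ' mg ', ' g ', ' kg ', ' mm ', ' cm ',
-- ' m ', 'inch', 'in.', '(15- to 18-pound)', 'ball', 'qts', ' t ']
--     ings = ing.split()
--     result = {}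
--     desc = ""
--     for i in ings:
--         _unit = False
--         for u in units:
--             if u in  " " + i.lower() + " ":
--                 result["quantity"] = desc
--                 desc = ""
--                 result["unit"] = i
--                 _unit = True
--                 break
--         if _unit != True:
--             desc = desc + " " + i
--     result["description"] = desc
--     return result
-- ===== SOURCE B (Python) =====
-- def breakIngredient(ing):
--     units =  ['cup', 'can', 'bottle', 'tablespoon', 'tablespoons', 'tbsp', 'ounce', 'pound',
-- 'box', 'fliud ounce', 'fl oz', 'pint', 'gill','teaspoon', 'quart',
-- 'gallon', ' ml ', ' c. ', ' l ', ' ml ', ' dl ', ' mg ', ' g ', ' kg ', ' mm ', ' cm ',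
-- ' m ', 'inch', 'in.', '(15- to 18-pound)', 'ball', 'qts', ' t ']
--
--     def is_unit(w):
--         return any(u in " " + w.lower() + " " for u in units)
--
--     def take_non_units(ws):
--         # longest prefix of ws containing no unit word
--         out = []
--         for w in ws:
--             if is_unit(w):
--                 break
--             out.append(w)
--         return out
--
--     def join(seg):
--         return "".join(" " + w for w in seg)
--
--     rev = ing.split()[::-1]
--     tail = take_non_units(rev)          # the words after the last unit, reversed
--     rest = rev[len(tail):]
--     if not rest:
--         return {"description": join(ing.split())}
--     qty_rev = take_non_units(rest[1:])  # the words between the last two units, reversed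
--     return {"quantity": join(qty_rev[::-1]),
--             "unit": rest[0],
--             "description": join(tail[::-1])}
-- ===== Notes on version B (the rewrite author's own statement) =====
-- stated objective: alternative
-- what changed: Replaces A's stateful forward loop (accumulator reset at every unit word, dict mutated in place) by a direct decomposition: reverse the word list, take the non-unit prefix (= description), the next word is the unit, then take the following non-unit segment (= quantity), and build the dict in one literal.
import Mathlib
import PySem

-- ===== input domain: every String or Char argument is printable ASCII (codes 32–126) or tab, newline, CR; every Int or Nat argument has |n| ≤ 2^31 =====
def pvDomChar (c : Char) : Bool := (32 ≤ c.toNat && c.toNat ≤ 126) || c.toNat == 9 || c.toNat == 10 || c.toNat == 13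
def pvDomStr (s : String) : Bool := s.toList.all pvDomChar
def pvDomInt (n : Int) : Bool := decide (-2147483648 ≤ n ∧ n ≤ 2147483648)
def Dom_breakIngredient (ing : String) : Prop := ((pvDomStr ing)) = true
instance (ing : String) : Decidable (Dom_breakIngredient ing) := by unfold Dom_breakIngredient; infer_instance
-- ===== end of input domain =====

-- B replaces A's stateful forward loop by a right-to-left decomposition (non-unit suffix = description,
-- preceding word = unit, preceding non-unit run = quantity); objective: alternative, same cost.

-- ===== PORT A =====
def pvUnits : List String :=
  ["cup", "can", "bottle", "tablespoon", "tablespoons", "tbsp", "ounce", "pound",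
   "box", "fliud ounce", "fl oz", "pint", "gill", "teaspoon", "quart",
   "gallon", " ml ", " c. ", " l ", " ml ", " dl ", " mg ", " g ", " kg ", " mm ", " cm ",
   " m ", "inch", "in.", "(15- to 18-pound)", "ball", "qts", " t "]

-- A's inner 'for u in units: … break' loop, step for step
def pvInnerA (us : List String) (i : String) (r : PySem.Dict String String) (desc : String) :
    PySem.Dict String String × String × Bool :=
  match us with
  | [] => (r, desc, false)
  | u :: rest =>
      if PySem.Str.isIn u (" " ++ PySem.Str.lower i ++ " ") then
        ((r.insert "quantity" desc).insert "unit" i, "", true)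
      else pvInnerA rest i r desc

-- one iteration of A's outer 'for i in ings' loop
def pvStepA (st : PySem.Dict String String × String) (i : String) :
    PySem.Dict String String × String :=
  match pvInnerA pvUnits i st.1 st.2 with
  | (r', desc', b) => if b then (r', desc') else (st.1, st.2 ++ " " ++ i)

def breakIngredient (ing : String) : List (String × String) :=
  ((((PySem.Str.split₀ ing).foldl pvStepA (PySem.Dict.mk [], "")).1.insert "description"
    (((PySem.Str.split₀ ing).foldl pvStepA (PySem.Dict.mk [], "")).2)).items)

-- ===== PORT B =====
def pvIsUnit (w : String) : Bool :=
  pvUnits.any (fun u => PySem.Str.isIn u (" " ++ PySem.Str.lower w ++ " "))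

-- Source B's take_non_units: for-loop with break, as the obvious prefix recursion
def pvTakeNonUnits : List String → List String
  | [] => []
  | w :: t => if pvIsUnit w then [] else w :: pvTakeNonUnits t

-- "".join(" " + w for w in seg): left-to-right concatenation
def pvJoin (seg : List String) : String :=
  seg.foldl (fun acc w => acc ++ (" " ++ w)) ""

-- rev[len(tail):] with tail the non-unit prefix of rev (start index ≥ 0: slice = drop, exact)
def pvRest (rev : List String) : List String :=
  rev.drop (pvTakeNonUnits rev).length

def breakIngredient_alt (ing : String) : List (String × String) :=
  if pvRest ((PySem.Str.split₀ ing).reverse) = [] then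
    [("description", pvJoin (PySem.Str.split₀ ing))]
  else
    -- rest[0] (guarded nonempty: headI is exact) and rest[1:] (slice from 1 = drop 1, exact)
    [("quantity", pvJoin (pvTakeNonUnits ((pvRest ((PySem.Str.split₀ ing).reverse)).drop 1)).reverse),
     ("unit", (pvRest ((PySem.Str.split₀ ing).reverse)).headI),
     ("description", pvJoin (pvTakeNonUnits ((PySem.Str.split₀ ing).reverse)).reverse)]

-- ===== PRECONDITION & SPEC =====
def Spec_breakIngredient (ing : String) (out : List (String × String)) : Prop := out = breakIngredient_alt ing
instance (ing : String) (out : List (String × String)) : Decidable (Spec_breakIngredient ing out) := by unfold Spec_breakIngredient; infer_instance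

-- ===== CLAIM (what is proved, stated in full; the proofs are below) =====
def Claim_equal_breakIngredient : Prop := ∀ (ing : String), Dom_breakIngredient ing → Spec_breakIngredient ing (breakIngredient ing)

-- ===== LEMMAS AND PROOFS =====

lemma pvInnerA_eq (us : List String) (i : String) (r : PySem.Dict String String) (desc : String) :
    pvInnerA us i r desc =
      if us.any (fun u => PySem.Str.isIn u (" " ++ PySem.Str.lower i ++ " ")) then
        ((r.insert "quantity" desc).insert "unit" i, "", true)
      else (r, desc, false) := by
  induction us with
  | nil => simp [pvInnerA]
  | cons u rest ih =>
      by_cases h : PySem.Str.isIn u (" " ++ PySem.Str.lower i ++ " ") = true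
      · simp only [pvInnerA, List.any_cons, h]; simp
      · simp only [Bool.not_eq_true] at h
        simp only [pvInnerA, List.any_cons, h, ih]; simp

lemma pvStepA_eq (r : PySem.Dict String String) (desc i : String) :
    pvStepA (r, desc) i =
      if pvIsUnit i then ((r.insert "quantity" desc).insert "unit" i, "") else (r, desc ++ " " ++ i) := by
  unfold pvStepA pvIsUnit
  rw [pvInnerA_eq]
  by_cases h : (pvUnits.any fun u => PySem.Str.isIn u (" " ++ PySem.Str.lower i ++ " ")) = true
  · simp only [h]; simp
  · simp only [Bool.not_eq_true] at h
    simp only [h]; simp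

lemma pvJoin_snoc (ws : List String) (x : String) : pvJoin (ws ++ [x]) = pvJoin ws ++ " " ++ x := by
  simp [pvJoin, List.foldl_append, String.append_assoc]

-- dict-shape computations used by the loop invariant
lemma ins_pair_empty (d x : String) :
    ((PySem.Dict.mk ([] : List (String × String))).insert "quantity" d).insert "unit" x
      = PySem.Dict.mk [("quantity", d), ("unit", x)] := by
  simp [PySem.Dict.insert]

lemma ins_pair_pair (q0 u0 d x : String) :
    ((PySem.Dict.mk [("quantity", q0), ("unit", u0)]).insert "quantity" d).insert "unit" x
      = PySem.Dict.mk [("quantity", d), ("unit", x)] := by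
  simp [PySem.Dict.insert]

lemma tnu_drop_nil (l : List String) (h : l.drop (pvTakeNonUnits l).length = []) :
    pvTakeNonUnits l = l := by
  induction l with
  | nil => rfl
  | cons w t ih =>
      by_cases hw : pvIsUnit w = true
      · simp [pvTakeNonUnits, hw] at h
      · simp only [Bool.not_eq_true] at hw
        simp only [pvTakeNonUnits, hw, Bool.false_eq_true, if_false, List.length_cons,
          List.drop_succ_cons] at h ⊢
        rw [ih h]

-- the quantity A is carrying at the moment it sees the last unit word
def pvQOf (before : List String) (desc : String) : String :=
  (if pvRest before = [] then desc else "")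
    ++ pvJoin (pvTakeNonUnits before).reverse

-- the state of A's loop, characterized from the back of the word list
def pvSpecState (ws : List String) (r : PySem.Dict String String) (desc : String) :
    PySem.Dict String String × String :=
  if pvRest ws.reverse = [] then (r, desc ++ pvJoin ws)
  else
    (PySem.Dict.mk [("quantity", pvQOf ((pvRest ws.reverse).drop 1) desc),
                    ("unit", (pvRest ws.reverse).headI)],
     pvJoin (pvTakeNonUnits ws.reverse).reverse)

lemma loopChar (ws : List String) : ∀ (r : PySem.Dict String String) (desc : String),
    (r = PySem.Dict.mk [] ∨ ∃ q u, r = PySem.Dict.mk [("quantity", q), ("unit", u)]) →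
    ws.foldl pvStepA (r, desc) = pvSpecState ws r desc := by
  induction ws using List.reverseRecOn with
  | nil =>
      intro r desc _
      simp [pvSpecState, pvRest, pvTakeNonUnits, pvJoin]
  | append_singleton ws x ih =>
      intro r desc hr
      rw [List.foldl_append, List.foldl_cons, List.foldl_nil, ih r desc hr]
      have hrev : (ws ++ [x]).reverse = x :: ws.reverse := by simp
      unfold pvSpecState
      rw [hrev]
      by_cases hx : pvIsUnit x = true
      · -- x is a unit word: it becomes the (new) last unit word
        have hrest : pvRest (x :: ws.reverse) = x :: ws.reverse := by
          simp [pvRest, pvTakeNonUnits, hx]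
        rw [hrest]
        simp only [List.cons_ne_nil, if_false, List.drop_succ_cons, List.drop_zero, List.headI]
        have htnu : pvTakeNonUnits (x :: ws.reverse) = [] := by
          simp [pvTakeNonUnits, hx]
        rw [htnu]
        by_cases hdrop : pvRest ws.reverse = []
        · rw [if_pos hdrop, pvStepA_eq]
          simp only [hx, if_true]
          have hall : pvTakeNonUnits ws.reverse = ws.reverse := tnu_drop_nil _ hdrop
          unfold pvQOf
          rw [if_pos hdrop, hall, List.reverse_reverse]
          rcases hr with h0 | ⟨q, u, h0⟩ <;> subst h0
          · rw [ins_pair_empty]; rfl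
          · rw [ins_pair_pair]; rfl
        · rw [if_neg hdrop, pvStepA_eq]
          simp only [hx, if_true]
          rw [ins_pair_pair]
          unfold pvQOf
          rw [if_neg hdrop, String.empty_append]
          rfl
      · -- x is not a unit word: it joins the trailing description run
        simp only [Bool.not_eq_true] at hx
        have hrest : pvRest (x :: ws.reverse) = pvRest ws.reverse := by
          simp [pvRest, pvTakeNonUnits, hx]
        have htnu : pvTakeNonUnits (x :: ws.reverse) = x :: pvTakeNonUnits ws.reverse := by
          simp [pvTakeNonUnits, hx]
        rw [hrest, htnu]
        by_cases hdrop : pvRest ws.reverse = []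
        · rw [if_pos hdrop, if_pos hdrop, pvStepA_eq]
          simp only [hx, Bool.false_eq_true, if_false]
          rw [pvJoin_snoc]
          simp [String.append_assoc]
        · rw [if_neg hdrop, if_neg hdrop, pvStepA_eq]
          simp only [hx, Bool.false_eq_true, if_false]
          rw [List.reverse_cons, pvJoin_snoc]

-- assembling the final dict in each of the two shapes
lemma items_desc_empty (dd : String) :
    ((PySem.Dict.mk ([] : List (String × String))).insert "description" dd).items
      = [("description", dd)] := by
  simp [PySem.Dict.insert]

lemma items_desc_pair (q0 u0 dd : String) :
    ((PySem.Dict.mk [("quantity", q0), ("unit", u0)]).insert "description" dd).items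
      = [("quantity", q0), ("unit", u0), ("description", dd)] := by
  simp [PySem.Dict.insert]

-- ===== VERDICT (by name: the statement is the Claim_ definition above) =====
theorem breakIngredient_spec : Claim_equal_breakIngredient := by
  intro ing _
  unfold Spec_breakIngredient breakIngredient breakIngredient_alt
  rw [loopChar (PySem.Str.split₀ ing) (PySem.Dict.mk []) "" (Or.inl rfl)]
  unfold pvSpecState
  by_cases hdrop : pvRest ((PySem.Str.split₀ ing).reverse) = []
  · rw [if_pos hdrop, if_pos hdrop, items_desc_empty, String.empty_append]
  · rw [if_neg hdrop, if_neg hdrop, items_desc_pair]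
    unfold pvQOf
    split_ifs <;> rw [String.empty_append]
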